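-- pv_equiv track=rewrite | github.com/cviroulaud/nsi.github.io | terminale/langages/recursivite/exponentiation/scripts/exponentiation.py | puissance_iteratif_rapide
-- ===== SOURCE A (Python) =====
-- def puissance_iteratif_rapide(x, n):
--     res = 1
--     while n > 0:
--         if n % 2 == 0:
--             x = x*x
--             n = n // 2
--         else:
--             res = res * x
--             x = x*x
--             n = n//2
--     return res
-- ===== SOURCE B (Python) =====
-- def puissance_iteratif_rapide(x, n):
--     if n <= 0:
--         return 1
--     half = puissance_iteratif_rapide(x, n // 2)
--     if n % 2 == 0:
--         return half * half
--     return x * half * half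
-- ===== Notes on version B (the rewrite author's own statement) =====
-- stated objective: alternative
-- what changed: Replaces the iterative bit-by-bit loop carrying (res, x, n) state with a recursion on n halved that computes half = x^(n//2) once and squares it.
import Mathlib
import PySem

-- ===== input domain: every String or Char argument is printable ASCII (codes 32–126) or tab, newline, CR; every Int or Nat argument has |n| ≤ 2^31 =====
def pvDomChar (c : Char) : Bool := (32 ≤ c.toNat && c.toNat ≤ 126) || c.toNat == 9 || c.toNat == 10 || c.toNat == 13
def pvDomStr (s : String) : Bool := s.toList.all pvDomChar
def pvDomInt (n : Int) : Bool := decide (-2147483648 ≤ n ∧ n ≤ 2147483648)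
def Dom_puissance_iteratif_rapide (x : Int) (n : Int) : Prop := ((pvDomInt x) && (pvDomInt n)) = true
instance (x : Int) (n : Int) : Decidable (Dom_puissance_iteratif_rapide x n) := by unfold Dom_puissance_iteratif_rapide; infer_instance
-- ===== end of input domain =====

-- B replaces the iterative bit loop with recursion on n halved (alternative decomposition, same cost).
-- ===== PORT A =====
def puissLoopA (x : Int) (n : Int) (res : Int) : Int :=
  if h : n > 0 then
    if PySem.Int.mod n 2 = 0 then
      puissLoopA (x*x) (PySem.Int.floordiv n 2) res
    else
      puissLoopA (x*x) (PySem.Int.floordiv n 2) (res * x)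
  else res
termination_by n.toNat
decreasing_by
  all_goals
    rw [PySem.Int.floordiv_eq_ediv_of_pos (by omega : (0:Int) < 2)]
    omega

def puissance_iteratif_rapide (x : Int) (n : Int) : Int :=
  puissLoopA x n 1

-- ===== PORT B =====
def puissance_iteratif_rapide_alt (x : Int) (n : Int) : Int :=
  if h : n ≤ 0 then 1
  else
    let half := puissance_iteratif_rapide_alt x (PySem.Int.floordiv n 2)
    if PySem.Int.mod n 2 = 0 then half * half
    else x * half * half
termination_by n.toNat
decreasing_by
  rw [PySem.Int.floordiv_eq_ediv_of_pos (by omega : (0:Int) < 2)]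
  omega

-- ===== PRECONDITION & SPEC =====
def Spec_puissance_iteratif_rapide (x : Int) (n : Int) (out : Int) : Prop := out = puissance_iteratif_rapide_alt x n
instance (x : Int) (n : Int) (out : Int) : Decidable (Spec_puissance_iteratif_rapide x n out) := by unfold Spec_puissance_iteratif_rapide; infer_instance

-- ===== CLAIM (what is proved, stated in full; the proofs are below) =====
def Claim_equal_puissance_iteratif_rapide : Prop := ∀ (x : Int) (n : Int), Dom_puissance_iteratif_rapide x n → Spec_puissance_iteratif_rapide x n (puissance_iteratif_rapide x n)

-- ===== LEMMAS AND PROOFS =====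


theorem puissLoopA_pow (k : Nat) (x n res : Int) (hk : n.toNat = k) :
    puissLoopA x n res = res * x ^ n.toNat := by
  induction k using Nat.strong_induction_on generalizing x n res with
  | _ k ih =>
    rw [puissLoopA]
    split_ifs with h hev
    · rw [PySem.Int.mod_eq_emod_of_pos (by omega : (0:Int) < 2)] at hev
      rw [PySem.Int.floordiv_eq_ediv_of_pos (by omega : (0:Int) < 2)]
      rw [ih (n / 2).toNat (by omega) _ _ _ rfl]
      have h2 : (n / 2).toNat + (n / 2).toNat = n.toNat := by omega
      rw [← h2, pow_add, ← mul_pow]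
    · rw [PySem.Int.mod_eq_emod_of_pos (by omega : (0:Int) < 2)] at hev
      rw [PySem.Int.floordiv_eq_ediv_of_pos (by omega : (0:Int) < 2)]
      rw [ih (n / 2).toNat (by omega) _ _ _ rfl]
      have h2 : (n / 2).toNat + (n / 2).toNat + 1 = n.toNat := by omega
      rw [← h2, pow_succ, pow_add, ← mul_pow]
      ring
    · have : n.toNat = 0 := by omega
      rw [this, pow_zero, mul_one]

theorem alt_pow (k : Nat) (x n : Int) (hk : n.toNat = k) :
    puissance_iteratif_rapide_alt x n = x ^ n.toNat := by
  induction k using Nat.strong_induction_on generalizing x n with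
  | _ k ih =>
    rw [puissance_iteratif_rapide_alt]
    split_ifs with h hev
    · have : n.toNat = 0 := by omega
      rw [this, pow_zero]
    · rw [PySem.Int.mod_eq_emod_of_pos (by omega : (0:Int) < 2)] at hev
      rw [PySem.Int.floordiv_eq_ediv_of_pos (by omega : (0:Int) < 2)]
      rw [ih (n / 2).toNat (by omega) _ _ rfl]
      have h2 : (n / 2).toNat + (n / 2).toNat = n.toNat := by omega
      rw [← h2, pow_add]
    · rw [PySem.Int.mod_eq_emod_of_pos (by omega : (0:Int) < 2)] at hev
      rw [PySem.Int.floordiv_eq_ediv_of_pos (by omega : (0:Int) < 2)]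
      rw [ih (n / 2).toNat (by omega) _ _ rfl]
      have h2 : (n / 2).toNat + (n / 2).toNat + 1 = n.toNat := by omega
      rw [← h2, pow_succ, pow_add]
      ring

-- ===== VERDICT (by name: the statement is the Claim_ definition above) =====
theorem puissance_iteratif_rapide_spec : Claim_equal_puissance_iteratif_rapide := by
  intro x n _
  show puissLoopA x n 1 = puissance_iteratif_rapide_alt x n
  rw [puissLoopA_pow n.toNat x n 1 rfl, alt_pow n.toNat x n rfl, one_mul]
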